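-- pv_equiv track=rewrite | github.com/rceballos98/rhythmBox | rhythmGenerator.py | reflecting_interlocking
-- ===== SOURCE A (Python) =====
-- def complement(rhythm):
-- 	complement = []
-- 	for pulse in rhythm:
-- 		if pulse == 1:
-- 			complement.append(0)
-- 		else:
-- 			complement.append(1)
-- 	return complement
--
-- def reflecting_interlocking(rhythm):
-- 	onsets = 0
-- 	silences = 0
-- 	for pulse in rhythm:
-- 		if pulse == 1:
-- 			onsets +=1
-- 		if pulse == 0:
-- 			silences += 1
-- 	if silences != onsets:
-- 		raise ValueError('Rhythm given does not \
-- have the same number of silences as onsets')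
-- 	else:
-- 		return complement(rhythm)
-- ===== SOURCE B (Python) =====
-- def reflecting_interlocking(rhythm):
-- 	out = []
-- 	onsets = 0
-- 	silences = 0
-- 	for pulse in rhythm:
-- 		if pulse == 1:
-- 			onsets += 1
-- 			out.append(0)
-- 		else:
-- 			if pulse == 0:
-- 				silences += 1
-- 			out.append(1)
-- 	if onsets != silences:
-- 		raise ValueError('Rhythm given does not \
-- have the same number of silences as onsets')
-- 	return out
-- ===== Notes on version B (the rewrite author's own statement) =====
-- stated objective: simpler
-- what changed: B fuses A's separate counting loop and the two-branch complement helper into a single pass that builds the complement list while counting onsets and silences, removing the helper function and the second traversal.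
import Mathlib
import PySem

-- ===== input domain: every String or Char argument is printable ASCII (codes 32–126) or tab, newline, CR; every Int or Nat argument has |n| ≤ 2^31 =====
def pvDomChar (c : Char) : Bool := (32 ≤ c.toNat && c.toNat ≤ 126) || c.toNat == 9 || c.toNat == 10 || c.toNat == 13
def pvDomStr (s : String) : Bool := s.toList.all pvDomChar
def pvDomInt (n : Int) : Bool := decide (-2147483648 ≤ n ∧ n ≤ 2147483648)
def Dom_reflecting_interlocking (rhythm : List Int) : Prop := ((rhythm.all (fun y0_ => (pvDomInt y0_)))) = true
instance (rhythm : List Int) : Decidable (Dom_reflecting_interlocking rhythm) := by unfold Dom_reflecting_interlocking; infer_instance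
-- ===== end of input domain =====

-- B fuses A's counting loop and the complement helper into one pass building the list while counting (objective: simpler).
-- ===== PORT A =====


def pvComplStep (acc : List Int) (pulse : Int) : List Int :=
  if pulse == 1 then acc ++ [0] else acc ++ [1]

def pvCountStep (cs : Int × Int) (pulse : Int) : Int × Int :=
  let cs := if pulse == 1 then (cs.1 + 1, cs.2) else cs
  if pulse == 0 then (cs.1, cs.2 + 1) else cs

def pvComplement (rhythm : List Int) : List Int :=
  rhythm.foldl pvComplStep []

def reflecting_interlocking (rhythm : List Int) : List Int :=
  let cs := rhythm.foldl pvCountStep (0, 0)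
  if cs.2 ≠ cs.1 then []  -- Python raises ValueError here; excluded by Pre_
  else pvComplement rhythm

-- ===== PORT B =====
def pvFusedStep (st : List Int × Int × Int) (pulse : Int) : List Int × Int × Int :=
  if pulse == 1 then (st.1 ++ [0], st.2.1 + 1, st.2.2)
  else (st.1 ++ [1], st.2.1, if pulse == 0 then st.2.2 + 1 else st.2.2)

def reflecting_interlocking_alt (rhythm : List Int) : List Int :=
  let st := rhythm.foldl pvFusedStep ([], 0, 0)
  if st.2.1 ≠ st.2.2 then []  -- Python raises ValueError here; excluded by Pre_
  else st.1

-- ===== PRECONDITION & SPEC =====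
-- Pre_ excludes exactly the rhythms whose number of 1s differs from their number of 0s, on which A raises ValueError.
def Pre_reflecting_interlocking (rhythm : List Int) : Prop :=
  PySem.List.count rhythm 1 = PySem.List.count rhythm 0

instance (rhythm : List Int) : Decidable (Pre_reflecting_interlocking rhythm) := by
  unfold Pre_reflecting_interlocking; infer_instance

def pvWitness_reflecting_interlocking : List Int := [1, 0, 1, 0]

def Spec_reflecting_interlocking (rhythm : List Int) (out : List Int) : Prop := out = reflecting_interlocking_alt rhythm
instance (rhythm : List Int) (out : List Int) : Decidable (Spec_reflecting_interlocking rhythm out) := by unfold Spec_reflecting_interlocking; infer_instance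

-- ===== CLAIM (what is proved, stated in full; the proofs are below) =====
def Claim_equal_reflecting_interlocking : Prop := ∀ (rhythm : List Int), Dom_reflecting_interlocking rhythm → Pre_reflecting_interlocking rhythm → Spec_reflecting_interlocking rhythm (reflecting_interlocking rhythm)

-- ===== LEMMAS AND PROOFS =====
theorem pv_fused_eq (rhythm : List Int) : ∀ (out : List Int) (o s : Int),
    rhythm.foldl pvFusedStep (out, o, s)
    = (rhythm.foldl pvComplStep out, rhythm.foldl pvCountStep (o, s)) := by
  induction rhythm with
  | nil => intro out o s; simp
  | cons p t ih =>
    intro out o s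
    simp only [List.foldl_cons]
    by_cases h1 : p = 1
    · subst h1
      rw [show pvFusedStep (out, o, s) 1 = (out ++ [0], o + 1, s) from by simp [pvFusedStep],
          show pvComplStep out 1 = out ++ [0] from by simp [pvComplStep],
          show pvCountStep (o, s) 1 = (o + 1, s) from by simp [pvCountStep]]
      exact ih (out ++ [0]) (o + 1) s
    · by_cases h0 : p = 0
      · subst h0
        rw [show pvFusedStep (out, o, s) 0 = (out ++ [1], o, s + 1) from by simp [pvFusedStep],
            show pvComplStep out 0 = out ++ [1] from by simp [pvComplStep],
            show pvCountStep (o, s) 0 = (o, s + 1) from by simp [pvCountStep]]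
        exact ih (out ++ [1]) o (s + 1)
      · rw [show pvFusedStep (out, o, s) p = (out ++ [1], o, s) from by simp [pvFusedStep, h1, h0],
            show pvComplStep out p = out ++ [1] from by simp [pvComplStep, h1],
            show pvCountStep (o, s) p = (o, s) from by simp [pvCountStep, h1, h0]]
        exact ih (out ++ [1]) o s

theorem pv_count_eq (rhythm : List Int) : ∀ (o s : Int),
    rhythm.foldl pvCountStep (o, s)
    = (o + PySem.List.count rhythm 1, s + PySem.List.count rhythm 0) := by
  induction rhythm with
  | nil => intro o s; simp [PySem.List.count]
  | cons p t ih =>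
    intro o s
    simp only [List.foldl_cons]
    by_cases h1 : p = 1
    · subst h1
      rw [show pvCountStep (o, s) 1 = (o + 1, s) from by simp [pvCountStep], ih]
      simp [PySem.List.count]
      ring
    · by_cases h0 : p = 0
      · subst h0
        rw [show pvCountStep (o, s) 0 = (o, s + 1) from by simp [pvCountStep], ih]
        simp [PySem.List.count, h1]
        ring
      · rw [show pvCountStep (o, s) p = (o, s) from by simp [pvCountStep, h1, h0], ih]
        simp [PySem.List.count, h1, h0]

-- ===== VERDICT (by name: the statement is the Claim_ definition above) =====
theorem reflecting_interlocking_spec : Claim_equal_reflecting_interlocking := by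
  intro rhythm _ hpre
  unfold Spec_reflecting_interlocking reflecting_interlocking reflecting_interlocking_alt pvComplement
  rw [pv_fused_eq, pv_count_eq]
  unfold Pre_reflecting_interlocking at hpre
  simp only [PySem.List.count] at hpre
  simp [hpre]
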